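-- pv_equiv track=rewrite | github.com/antonroesler/vogelring-analytics | app/views/map_usecase.py | _two_month_bin
-- ===== SOURCE A (Python) =====
-- def _two_month_bin(month: int) -> str:
--     pairs = [
--         (1, "Jan–Feb"),
--         (3, "Mär–Apr"),
--         (5, "Mai–Jun"),
--         (7, "Jul–Aug"),
--         (9, "Sep–Okt"),
--         (11, "Nov–Dez"),
--     ]
--     for start, label in pairs:
--         if start <= month <= start + 1:
--             return label
--     return "?"
-- ===== SOURCE B (Python) =====
-- _LABELS = ["Jan–Feb", "Mär–Apr", "Mai–Jun", "Jul–Aug", "Sep–Okt", "Nov–Dez"]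
--
-- def _two_month_bin(month: int) -> str:
--     if 1 <= month <= 12:
--         return _LABELS[int((month - 1) // 2)]
--     return "?"
-- ===== Notes on version B (the rewrite author's own statement) =====
-- stated objective: simpler
-- what changed: Replaced the linear scan over (start, label) pairs by a range guard plus direct arithmetic indexing labels[(month-1)//2] into a labels list.
import Mathlib
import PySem

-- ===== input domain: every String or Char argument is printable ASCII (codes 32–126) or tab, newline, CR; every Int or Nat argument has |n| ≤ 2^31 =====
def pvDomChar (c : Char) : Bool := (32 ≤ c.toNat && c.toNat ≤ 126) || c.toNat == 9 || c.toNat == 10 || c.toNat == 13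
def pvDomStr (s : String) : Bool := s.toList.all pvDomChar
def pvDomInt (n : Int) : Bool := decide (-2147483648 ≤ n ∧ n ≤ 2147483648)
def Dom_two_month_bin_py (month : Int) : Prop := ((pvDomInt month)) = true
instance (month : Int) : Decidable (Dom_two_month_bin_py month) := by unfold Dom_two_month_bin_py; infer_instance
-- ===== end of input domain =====

-- B replaces A's scan over (start,label) pairs with a range check and direct indexing ((month-1)//2); objective: simpler.

-- ===== PORT A =====
-- loop 'for start, label in pairs: if start <= month <= start+1: return label' as structural recursion
def twoMonthScan (month : Int) : List (Int × String) → String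
  | [] => "?"
  | (start, label) :: rest =>
      if start ≤ month ∧ month ≤ start + 1 then label else twoMonthScan month rest

def two_month_bin_py (month : Int) : String :=
  twoMonthScan month
    [(1, "Jan–Feb"), (3, "Mär–Apr"), (5, "Mai–Jun"), (7, "Jul–Aug"), (9, "Sep–Okt"), (11, "Nov–Dez")]

-- ===== PORT B =====
def twoMonthLabels : List String :=
  ["Jan–Feb", "Mär–Apr", "Mai–Jun", "Jul–Aug", "Sep–Okt", "Nov–Dez"]

def two_month_bin_py_alt (month : Int) : String :=
  if 1 ≤ month ∧ month ≤ 12 then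
    (PySem.List.pyGet? twoMonthLabels (PySem.Int.floordiv (month - 1) 2)).getD "?"
  else "?"

-- ===== PRECONDITION & SPEC =====
def Spec_two_month_bin_py (month : Int) (out : String) : Prop := out = two_month_bin_py_alt month
instance (month : Int) (out : String) : Decidable (Spec_two_month_bin_py month out) := by unfold Spec_two_month_bin_py; infer_instance

-- ===== CLAIM (what is proved, stated in full; the proofs are below) =====
def Claim_equal_two_month_bin_py : Prop := ∀ (month : Int), Dom_two_month_bin_py month → Spec_two_month_bin_py month (two_month_bin_py month)

-- ===== LEMMAS AND PROOFS =====

-- ===== VERDICT (by name: the statement is the Claim_ definition above) =====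
theorem two_month_bin_py_spec : Claim_equal_two_month_bin_py := by
  intro month _
  unfold Spec_two_month_bin_py
  by_cases h : 1 ≤ month ∧ month ≤ 12
  · obtain ⟨h1, h2⟩ := h
    interval_cases month <;> rfl
  · have e : two_month_bin_py_alt month = "?" := by
      simp [two_month_bin_py_alt, h]
    rw [e]
    simp only [two_month_bin_py, twoMonthScan]
    have : ¬ (1 ≤ month ∧ month ≤ 12) := h
    split_ifs <;> first | rfl | (exfalso; omega)
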